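-- pv_equiv track=rewrite | github.com/webdastur/ProgrammingProblems | Hackerrank/sorted_sums.py | sortedSum
-- ===== SOURCE A (Python) =====
-- class SortedSums:
--     def __init__(self, size):
--         self.size = size
--         self.arr = [0] * self.size
--
--     def add(self, x, val):
--         if x == 0:
--             self.arr[0] += val
--             return
--         while self.size > x:
--             self.arr[x] += val
--             x += x & (-x)
--
--     def rank(self, x):
--         if 0 > x:
--             return 0
--         res = self.arr[0]
--         while 0 < x:
--             res += self.arr[x]
--             x &= x - 1
--         return res
--
-- def sortedSum(a):
--     pre = SortedSums(10 ** 6 + 1)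
--     post = SortedSums(10 ** 6 + 1)
--     temp = total = ans = 0
--     n = len(a)
--     for i in range(n):
--         pos = pre.rank(a[i]) + 1
--
--         g = total - post.rank(a[i])
--         temp = (temp + pos * a[i] + g) % (10 ** 9 + 7)
--         ans = (ans + temp) % (10 ** 9 + 7)
--         total += a[i]
--
--         pre.add(a[i], 1)
--         post.add(a[i], a[i])
--     return ans
-- ===== SOURCE B (Python) =====
-- def sortedSum(a):
--     mod = 10 ** 9 + 7
--     s = []
--     ans = 0
--     for v in a:
--         s.append(v)
--         s.sort()
--         temp = sum((i + 1) * x for i, x in enumerate(s)) % mod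
--         ans = (ans + temp) % mod
--     return ans
-- ===== Notes on version B (the rewrite author's own statement) =====
-- stated objective: simpler
-- what changed: Replaces the two size-10^6 Fenwick (binary indexed) trees and the incremental pos/g/total bookkeeping by a plain list kept sorted, recomputing each prefix's weighted sum sum((i+1)*x) directly; value-range restriction disappears.
import Mathlib
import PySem

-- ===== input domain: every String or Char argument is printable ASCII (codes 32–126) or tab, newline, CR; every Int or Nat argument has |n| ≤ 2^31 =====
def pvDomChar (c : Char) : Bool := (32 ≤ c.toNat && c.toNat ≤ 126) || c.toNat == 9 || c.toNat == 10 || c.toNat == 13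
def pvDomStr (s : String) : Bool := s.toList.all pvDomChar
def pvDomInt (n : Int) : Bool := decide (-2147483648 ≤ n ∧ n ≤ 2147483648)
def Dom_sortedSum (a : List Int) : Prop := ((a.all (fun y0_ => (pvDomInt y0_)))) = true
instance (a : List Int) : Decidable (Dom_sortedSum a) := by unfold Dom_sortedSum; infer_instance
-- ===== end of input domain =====

-- B replaces A's two Fenwick trees and incremental bookkeeping by a plain sorted list whose
-- weighted pfx sum is recomputed each step (objective: simpler; not faster).

-- ===== PORT A =====
-- SortedSums.add's while-loop.  Indexing is exact for indices in [0, size) (the domain Pre_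
-- admits); the fuel only totalizes the while-loop and is never exhausted on Pre_ inputs.
def fenAddLoop (size : Int) (arr : Array Int) (x val : Int) : Nat → Array Int
  | 0 => arr
  | f + 1 =>
    if size > x then
      fenAddLoop size (arr.setIfInBounds x.toNat (arr.getD x.toNat 0 + val))
        (x + PySem.Int.band x (-x)) val f
    else arr

-- SortedSums.add
def fenAdd (size : Int) (arr : Array Int) (x val : Int) : Array Int :=
  if x = 0 then arr.setIfInBounds 0 (arr.getD 0 0 + val)
  else fenAddLoop size arr x val size.toNat

-- SortedSums.rank's while-loop (res accumulates; x strictly decreases, fuel totalizes)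
def fenRankLoop (arr : Array Int) (res x : Int) : Nat → Int
  | 0 => res
  | f + 1 =>
    if 0 < x then fenRankLoop arr (res + arr.getD x.toNat 0) (PySem.Int.band x (x - 1)) f
    else res

-- SortedSums.rank
def fenRank (arr : Array Int) (x : Int) : Int :=
  if 0 > x then 0 else fenRankLoop arr (arr.getD 0 0) x (x.toNat + 1)

-- the body of A's for-loop (state: pre, post, temp, total, ans)
def sortedSumStep (size : Int) (st : Array Int × Array Int × Int × Int × Int) (ai : Int) :
    Array Int × Array Int × Int × Int × Int :=
  match st with
  | (pre, post, temp, total, ans) =>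
    let pos := fenRank pre ai + 1
    let g := total - fenRank post ai
    let temp := PySem.Int.mod (temp + pos * ai + g) (10 ^ 9 + 7)
    let ans := PySem.Int.mod (ans + temp) (10 ^ 9 + 7)
    (fenAdd size pre ai 1, fenAdd size post ai ai, temp, total + ai, ans)

def sortedSum (a : List Int) : Int :=
  let size : Int := 10 ^ 6 + 1
  let pre0 : Array Int := Array.replicate size.toNat 0
  let post0 : Array Int := Array.replicate size.toNat 0
  let n : Int := (a.length : Int)
  ((PySem.List.pyRange 0 n).foldl
    (fun st i => sortedSumStep size st (PySem.List.pyGetD a i 0)) (pre0, post0, 0, 0, 0)).2.2.2.2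

-- ===== PORT B =====
def sortedSum_alt (a : List Int) : Int :=
  let m : Int := 10 ^ 9 + 7
  (a.foldl
    (fun (st : List Int × Int) v =>
      let s := PySem.List.sorted (st.1 ++ [v]) (fun x => x)
      let temp := PySem.Int.mod (((PySem.List.enumerate s).map (fun p => (p.1 + 1) * p.2)).sum) m
      (s, PySem.Int.mod (st.2 + temp) m))
    ([], 0)).2

-- ===== PRECONDITION & SPEC =====
-- Pre_ excludes exactly the inputs on which A does not return: any element above 10^6 makes
-- SortedSums.rank raise IndexError (the arrays have 10^6+1 slots) and any negative element
-- makes SortedSums.add loop forever (x & -x drives x to 0 below size).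
def Pre_sortedSum (a : List Int) : Prop := ∀ v ∈ a, 0 ≤ v ∧ v ≤ 10 ^ 6
instance (a : List Int) : Decidable (Pre_sortedSum a) := by unfold Pre_sortedSum; infer_instance
def pvWitness_sortedSum : List Int := [5, 3, 5, 0]

def Spec_sortedSum (a : List Int) (out : Int) : Prop := out = sortedSum_alt a
instance (a : List Int) (out : Int) : Decidable (Spec_sortedSum a out) := by unfold Spec_sortedSum; infer_instance

-- ===== CLAIM (what is proved, stated in full; the proofs are below) =====
def Claim_equal_sortedSum : Prop :=
  ∀ (a : List Int), Dom_sortedSum a → Pre_sortedSum a → Spec_sortedSum a (sortedSum a)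
-- ===== LEMMAS AND PROOFS =====

-- ## 1. lowbit arithmetic on Nat
def dropN (n : ℕ) : ℕ := n &&& (n - 1)
def lbN (n : ℕ) : ℕ := n - dropN n

theorem dropN_odd (n : ℕ) : dropN (2*n+1) = 2*n := by
  unfold dropN
  have e : 2*n+1-1 = 2*n := by omega
  rw [e]
  apply Nat.eq_of_testBit_eq
  intro i
  cases i with
  | zero => simp [Nat.testBit_zero]
  | succ j =>
    have h1 : (2*n+1)/2 = n := by omega
    have h2 : (2*n)/2 = n := by omega
    rw [Nat.testBit_and, Nat.testBit_succ, Nat.testBit_succ, h1, h2]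
    simp

theorem dropN_even (n : ℕ) : dropN (2*n) = 2 * dropN n := by
  unfold dropN
  rcases Nat.eq_zero_or_pos n with h | h
  · subst h; simp
  apply Nat.eq_of_testBit_eq
  intro i
  cases i with
  | zero => simp [Nat.testBit_zero, Nat.mul_mod_right]
  | succ j =>
    have h1 : (2*n)/2 = n := by omega
    have h2 : (2*n-1)/2 = n-1 := by omega
    have h3 : (2*(n &&& (n-1)))/2 = n &&& (n-1) := by omega
    rw [Nat.testBit_and, Nat.testBit_succ, Nat.testBit_succ, Nat.testBit_succ, h1, h2, h3,
      Nat.testBit_and]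

theorem dropN_lt (n : ℕ) (h : 1 ≤ n) : dropN n < n := by
  induction n using Nat.strong_induction_on with
  | _ n ih =>
    rcases Nat.even_or_odd n with ⟨m, hm⟩ | ⟨m, hm⟩
    · have hn : n = 2*m := by omega
      subst hn
      rw [dropN_even]
      have := ih m (by omega) (by omega)
      omega
    · subst hm
      rw [dropN_odd]; omega

theorem dropN_le (n : ℕ) : dropN n ≤ n := Nat.and_le_left

theorem lbN_pos (n : ℕ) (h : 1 ≤ n) : 1 ≤ lbN n := by
  have := dropN_lt n h; unfold lbN; omega

theorem lbN_odd (n : ℕ) : lbN (2*n+1) = 1 := by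
  unfold lbN; rw [dropN_odd]; omega

theorem lbN_even (n : ℕ) : lbN (2*n) = 2 * lbN n := by
  unfold lbN; rw [dropN_even]; have := dropN_le n; omega

-- ## 2. bridges from PySem.Int.band to dropN / lbN
theorem band_neg_self (x : Int) (h : 1 ≤ x) : PySem.Int.band x (-x) = (lbN x.toNat : Int) := by
  have h1 : (0:ℤ) ≤ x := by omega
  have h2 : ¬ ((0:ℤ) ≤ -x) := by omega
  have h3 : (-(-x) - 1).toNat = x.toNat - 1 := by omega
  rw [PySem.Int.band, if_pos h1, if_neg h2, h3]
  rfl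

theorem band_pred_self (x : Int) (h : 1 ≤ x) : PySem.Int.band x (x - 1) = (dropN x.toNat : Int) := by
  rw [PySem.Int.band_of_nonneg (by omega) (by omega)]
  have h3 : (x - 1).toNat = x.toNat - 1 := by omega
  rw [h3]; rfl

-- ## 3. the model paths of the two Fenwick loops
def upathM (N x : ℕ) : List ℕ :=
  if h : 1 ≤ x ∧ x < N then x :: upathM N (x + lbN x) else []
  termination_by N - x
  decreasing_by have := lbN_pos x h.1; omega

def dpathM (y : ℕ) : List ℕ :=
  if h : 1 ≤ y then y :: dpathM (dropN y) else []
  termination_by y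
  decreasing_by exact dropN_lt y h

theorem upathM_nil (N x : ℕ) (h : N ≤ x) : upathM N x = [] := by
  rw [upathM]; simp; omega

theorem mem_upathM_ge : ∀ (m N x i : ℕ), N - x ≤ m → i ∈ upathM N x → x ≤ i := by
  intro m
  induction m with
  | zero =>
    intro N x i hm hi
    rw [upathM_nil N x (by omega)] at hi
    simp at hi
  | succ m ih =>
    intro N x i hm hi
    rw [upathM] at hi
    by_cases h : 1 ≤ x ∧ x < N
    · rw [dif_pos h] at hi
      rcases List.mem_cons.mp hi with e | hi'
      · omega
      · have hl := lbN_pos x h.1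
        have := ih N (x + lbN x) i (by omega) hi'
        omega
    · rw [dif_neg h] at hi; simp at hi

theorem mem_dpathM_pos : ∀ (y i : ℕ), i ∈ dpathM y → 1 ≤ i := by
  intro y
  induction y using Nat.strong_induction_on with
  | _ y ih =>
    intro i hi
    rw [dpathM] at hi
    by_cases h : 1 ≤ y
    · rw [dif_pos h] at hi
      rcases List.mem_cons.mp hi with e | hi'
      · omega
      · exact ih (dropN y) (dropN_lt y h) i hi'
    · rw [dif_neg h] at hi; simp at hi

-- path recurrences (halving)
theorem dpathM_even (b : ℕ) : dpathM (2*b) = (dpathM b).map (fun i => 2*i) := by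
  induction b using Nat.strong_induction_on with
  | _ b ih =>
    by_cases h : 1 ≤ b
    · rw [dpathM, dif_pos (show 1 ≤ 2*b by omega)]
      conv_rhs => rw [dpathM, dif_pos h]
      rw [dropN_even, ih (dropN b) (dropN_lt b h)]
      simp
    · have : b = 0 := by omega
      subst this
      rw [show 2*0 = 0 by omega, dpathM]; simp

theorem dpathM_odd (b : ℕ) : dpathM (2*b+1) = (2*b+1) :: (dpathM b).map (fun i => 2*i) := by
  rw [dpathM, dif_pos (by omega), dropN_odd, dpathM_even]

theorem upathM_even : ∀ (m N a : ℕ), N - 2*a ≤ m → 1 ≤ a →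
    upathM N (2*a) = (upathM ((N+1)/2) a).map (fun i => 2*i) := by
  intro m
  induction m with
  | zero =>
    intro N a hm ha
    rw [upathM_nil N (2*a) (by omega), upathM_nil ((N+1)/2) a (by omega)]
    rfl
  | succ m ih =>
    intro N a hm ha
    by_cases h : 2*a < N
    · rw [upathM, dif_pos ⟨by omega, h⟩]
      conv_rhs => rw [upathM, dif_pos (⟨ha, by omega⟩ : 1 ≤ a ∧ a < (N+1)/2)]
      have hl := lbN_pos a ha
      rw [lbN_even, show 2*a + 2*lbN a = 2*(a + lbN a) by ring,
        ih N (a + lbN a) (by omega) (by omega)]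
      simp
    · rw [upathM_nil N (2*a) (by omega), upathM_nil ((N+1)/2) a (by omega)]
      rfl

theorem upathM_odd (N a : ℕ) :
    upathM N (2*a+1) = if 2*a+1 < N then
      (2*a+1) :: (upathM ((N+1)/2) (a+1)).map (fun i => 2*i) else [] := by
  by_cases h : 2*a+1 < N
  · rw [if_pos h, upathM, dif_pos ⟨by omega, h⟩, lbN_odd,
      show 2*a+1+1 = 2*(a+1) by ring, upathM_even (N - 2*(a+1)) N (a+1) (by omega) (by omega)]
  · rw [if_neg h, upathM_nil N _ (by omega)]

-- ## 4. the intersection-count lemma: the add-path of x meets the rank-path of y once iff x ≤ y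
theorem mem_double (l : List ℕ) (i : ℕ) : (2*i ∈ l.map (fun k => 2*k)) ↔ i ∈ l := by
  constructor
  · intro h
    rcases List.mem_map.mp h with ⟨k, hk, e⟩
    have : k = i := by omega
    subst this; exact hk
  · intro h; exact List.mem_map.mpr ⟨i, h, rfl⟩

theorem odd_not_mem_double (l : List ℕ) (i : ℕ) : (2*i+1) ∉ l.map (fun k => 2*k) := by
  intro h
  rcases List.mem_map.mp h with ⟨k, _, e⟩
  omega

theorem cnt_lemma : ∀ (y x N : ℕ), 1 ≤ x → y < N →
    (dpathM y).countP (fun i => decide (i ∈ upathM N x)) = if x ≤ y then 1 else 0 := by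
  intro y
  induction y using Nat.strong_induction_on with
  | _ y ih =>
    intro x N hx hyN
    by_cases hy : 1 ≤ y
    case neg =>
      have : y = 0 := by omega
      subst this
      rw [dpathM, dif_neg (by omega)]
      simp; omega
    by_cases hxN : x < N
    case neg =>
      rw [upathM_nil N x (by omega)]
      simp
      omega
    -- main case: 1 ≤ y < N, 1 ≤ x < N
    rcases Nat.even_or_odd y with ⟨b, hb⟩ | ⟨b, hb⟩
    · -- y = 2b, b ≥ 1
      have hy2 : y = 2*b := by omega
      subst hy2
      rw [dpathM_even, List.countP_map]
      rcases Nat.even_or_odd x with ⟨a, ha⟩ | ⟨a, ha⟩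
      · -- x = 2a
        have hx2 : x = 2*a := by omega
        subst hx2
        rw [upathM_even (N - 2*a) N a (by omega) (by omega)]
        have e : ∀ i : ℕ, ((fun i => decide (i ∈ (upathM ((N+1)/2) a).map (fun k => 2*k))) ∘ (fun i => 2*i)) i
            = (fun i => decide (i ∈ upathM ((N+1)/2) a)) i := by
          intro i; simp only [Function.comp_apply]
          rw [decide_eq_decide.mpr (mem_double _ i)]
        rw [List.countP_congr (fun i _ => by rw [e i])]
        rw [ih b (by omega) a ((N+1)/2) (by omega) (by omega)]
        split_ifs <;> omega
      · -- x = 2a+1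
        have hx2 : x = 2*a+1 := by omega
        subst hx2
        rw [upathM_odd, if_pos hxN]
        have e : ∀ i : ℕ, ((fun i => decide (i ∈ (2*a+1) :: (upathM ((N+1)/2) (a+1)).map (fun k => 2*k))) ∘ (fun i => 2*i)) i
            = (fun i => decide (i ∈ upathM ((N+1)/2) (a+1))) i := by
          intro i; simp only [Function.comp_apply, List.mem_cons]
          have h1 : ¬ (2*i = 2*a+1) := by omega
          rw [decide_eq_decide.mpr]
          constructor
          · intro h; rcases h with h | h
            · omega
            · exact (mem_double _ i).mp h
          · intro h; exact Or.inr ((mem_double _ i).mpr h)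
        rw [List.countP_congr (fun i _ => by rw [e i])]
        rw [ih b (by omega) (a+1) ((N+1)/2) (by omega) (by omega)]
        split_ifs <;> omega
    · -- y = 2b+1
      have hy2 : y = 2*b+1 := by omega
      subst hy2
      rw [dpathM_odd, List.countP_cons, List.countP_map]
      rcases Nat.even_or_odd x with ⟨a, ha⟩ | ⟨a, ha⟩
      · -- x = 2a, a ≥ 1
        have hx2 : x = 2*a := by omega
        subst hx2
        rw [upathM_even (N - 2*a) N a (by omega) (by omega)]
        have hhead : decide ((2*b+1) ∈ (upathM ((N+1)/2) a).map (fun k => 2*k)) = false := by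
          simp only [decide_eq_false_iff_not]
          exact odd_not_mem_double _ b
        have e : ∀ i : ℕ, ((fun i => decide (i ∈ (upathM ((N+1)/2) a).map (fun k => 2*k))) ∘ (fun i => 2*i)) i
            = (fun i => decide (i ∈ upathM ((N+1)/2) a)) i := by
          intro i; simp only [Function.comp_apply]
          rw [decide_eq_decide.mpr (mem_double _ i)]
        rw [List.countP_congr (fun i _ => by rw [e i])]
        rw [ih b (by omega) a ((N+1)/2) (by omega) (by omega), hhead]
        simp only [Bool.false_eq_true, if_false]
        split_ifs <;> omega
      · -- x = 2a+1
        have hx2 : x = 2*a+1 := by omega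
        subst hx2
        rw [upathM_odd, if_pos hxN]
        have e : ∀ i : ℕ, ((fun i => decide (i ∈ (2*a+1) :: (upathM ((N+1)/2) (a+1)).map (fun k => 2*k))) ∘ (fun i => 2*i)) i
            = (fun i => decide (i ∈ upathM ((N+1)/2) (a+1))) i := by
          intro i; simp only [Function.comp_apply, List.mem_cons]
          rw [decide_eq_decide.mpr]
          constructor
          · intro h; rcases h with h | h
            · omega
            · exact (mem_double _ i).mp h
          · intro h; exact Or.inr ((mem_double _ i).mpr h)
        rw [List.countP_congr (fun i _ => by rw [e i])]
        rw [ih b (by omega) (a+1) ((N+1)/2) (by omega) (by omega)]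
        have hhead : decide ((2*b+1) ∈ (2*a+1) :: (upathM ((N+1)/2) (a+1)).map (fun k => 2*k))
            = decide (a = b) := by
          simp only [List.mem_cons]
          rw [decide_eq_decide.mpr]
          constructor
          · intro h; rcases h with h | h
            · omega
            · exact absurd h (odd_not_mem_double _ b)
          · intro h; omega
        rw [hhead]
        simp only [decide_eq_true_eq]
        split_ifs <;> omega

-- ## 5. the array ports against the model paths
def rd (arr : Array Int) (i : ℕ) : Int := arr.getD i 0

theorem rd_set (arr : Array Int) (j : ℕ) (v : Int) (hj : j < arr.size) (i : ℕ) :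
    rd (arr.setIfInBounds j v) i = if i = j then v else rd arr i := by
  unfold rd
  rw [Array.getD_eq_getD_getElem?, Array.getD_eq_getD_getElem?, Array.getElem?_setIfInBounds]
  by_cases e : i = j
  · subst e; simp [hj]
  · rw [if_neg (fun h => e h.symm), if_neg e]

theorem rd_mkArray (n i : ℕ) : rd (Array.replicate n (0:Int)) i = 0 := by
  unfold rd
  rw [Array.getD_eq_getD_getElem?]
  by_cases hi : i < n
  · simp [hi]
  · rw [Array.getElem?_eq_none (by simpa using hi)]; rfl

theorem size_fenAddLoop (s : Int) : ∀ (f : ℕ) (arr : Array Int) (x val : Int),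
    (fenAddLoop s arr x val f).size = arr.size := by
  intro f
  induction f with
  | zero => intro arr x val; rfl
  | succ f ih =>
    intro arr x val
    rw [fenAddLoop]
    by_cases h : s > x
    · rw [if_pos h, ih, Array.size_setIfInBounds]
    · rw [if_neg h]

theorem fenAddLoop_rd : ∀ (f : ℕ) (x : Int) (arr : Array Int) (val : Int), 1 ≤ x →
    arr.size = 1000001 → 1000001 ≤ x.toNat + f → ∀ i,
    rd (fenAddLoop (10^6+1) arr x val f) i
      = rd arr i + (if i ∈ upathM 1000001 x.toNat then val else 0) := by
  intro f
  induction f with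
  | zero =>
    intro x arr val hx hsz hf i
    have : ¬ (1 ≤ x.toNat ∧ x.toNat < 1000001) := by omega
    rw [fenAddLoop, upathM, dif_neg this]
    simp
  | succ f ih =>
    intro x arr val hx hsz hf i
    rw [fenAddLoop]
    by_cases hg : (10^6+1 : Int) > x
    · rw [if_pos hg]
      have hxN : x.toNat < 1000001 := by omega
      have hlb := lbN_pos x.toNat (by omega)
      have hx' : (1:ℤ) ≤ x + PySem.Int.band x (-x) := by
        rw [band_neg_self x hx]; omega
      have htn : (x + PySem.Int.band x (-x)).toNat = x.toNat + lbN x.toNat := by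
        rw [band_neg_self x hx]; omega
      rw [ih (x + PySem.Int.band x (-x)) _ val hx' (by rw [Array.size_setIfInBounds]; exact hsz)
        (by omega) i, htn]
      have harr : rd (arr.setIfInBounds x.toNat (arr.getD x.toNat 0 + val)) i
          = if i = x.toNat then rd arr x.toNat + val else rd arr i :=
        rd_set arr x.toNat _ (by omega) i
      rw [harr]
      conv_rhs => rw [upathM, dif_pos (⟨by omega, hxN⟩ : 1 ≤ x.toNat ∧ x.toNat < 1000001)]
      by_cases hi : i = x.toNat
      · have hnot : i ∉ upathM 1000001 (x.toNat + lbN x.toNat) := by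
          intro hmem
          have := mem_upathM_ge 1000001 1000001 (x.toNat + lbN x.toNat) i (by omega) hmem
          omega
        rw [if_pos hi, if_neg hnot, if_pos (by rw [hi]; exact List.mem_cons_self)]
        rw [hi]
        ring
      · rw [if_neg hi]
        by_cases hm : i ∈ upathM 1000001 (x.toNat + lbN x.toNat)
        · rw [if_pos hm, if_pos (List.mem_cons_of_mem _ hm)]
        · rw [if_neg hm, if_neg (by
            intro hc
            rcases List.mem_cons.mp hc with h | h
            · exact hi h
            · exact hm h)]
    · rw [if_neg hg]
      have : ¬ (1 ≤ x.toNat ∧ x.toNat < 1000001) := by omega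
      rw [upathM, dif_neg this]
      simp

theorem fenRankLoop_eq : ∀ (f : ℕ) (y res : Int) (arr : Array Int), 0 ≤ y → y.toNat < f →
    fenRankLoop arr res y f = res + ((dpathM y.toNat).map (rd arr)).sum := by
  intro f
  induction f with
  | zero => intro y res arr hy hf; omega
  | succ f ih =>
    intro y res arr hy hf
    rw [fenRankLoop]
    by_cases hg : 0 < y
    · rw [if_pos hg]
      have hy' : (0:ℤ) ≤ PySem.Int.band y (y - 1) := by
        rw [band_pred_self y hg]; omega
      have hdl := dropN_lt y.toNat (by omega)
      have htn : (PySem.Int.band y (y - 1)).toNat = dropN y.toNat := by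
        rw [band_pred_self y hg]; omega
      rw [ih _ _ arr hy' (by omega)]
      conv_rhs => rw [dpathM, dif_pos (show 1 ≤ y.toNat by omega)]
      rw [htn]
      simp only [List.map_cons, List.sum_cons]
      show res + rd arr y.toNat + _ = _
      ring
    · rw [if_neg hg]
      have : y.toNat = 0 := by omega
      rw [this, dpathM, dif_neg (by omega)]
      simp

theorem fenRank_eq (arr : Array Int) (y : Int) (hy : 0 ≤ y) :
    fenRank arr y = rd arr 0 + ((dpathM y.toNat).map (rd arr)).sum := by
  unfold fenRank
  rw [if_neg (by omega), fenRankLoop_eq (y.toNat + 1) y _ arr hy (by omega)]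
  rfl

-- ## 6. the Fenwick invariant
def FenInv (arr : Array Int) (adds : List (Int × Int)) : Prop :=
  arr.size = 1000001 ∧ ∀ y : Int, 0 ≤ y → y ≤ 10^6 →
    fenRank arr y = (((adds.filter (fun p => decide (p.1 ≤ y))).map (fun p => p.2)).sum)

theorem fenRank_zeros (n : ℕ) (y : Int) (hy : 0 ≤ y) :
    fenRank (Array.replicate n (0:Int)) y = 0 := by
  rw [fenRank_eq _ y hy, rd_mkArray,
    List.map_congr_left (fun i _ => rd_mkArray n i),
    List.sum_eq_zero (fun x hx => by
      rcases List.mem_map.mp hx with ⟨i, _, e⟩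
      omega)]
  rfl

theorem FenInv_nil : FenInv (Array.replicate ((10:Int)^6+1).toNat 0) [] := by
  constructor
  · rw [Array.size_replicate]; norm_num; omega
  · intro y hy0 hy1
    rw [fenRank_zeros]
    · rfl
    · exact hy0

theorem FenInv_step (arr : Array Int) (adds : List (Int × Int)) (x val : Int)
    (hinv : FenInv arr adds) (hx0 : 0 ≤ x) (hx1 : x ≤ 10^6) :
    FenInv (fenAdd (10^6+1) arr x val) (adds ++ [(x, val)]) := by
  obtain ⟨hsz, hrank⟩ := hinv
  have hSt : ((10:Int)^6+1).toNat = 1000001 := by norm_num; omega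
  have hfilter : ∀ y : Int, ((adds ++ [(x, val)]).filter (fun p => decide (p.1 ≤ y))).map (fun p => p.2)
      = ((adds.filter (fun p => decide (p.1 ≤ y))).map (fun p => p.2))
        ++ (if x ≤ y then [val] else []) := by
    intro y
    rw [List.filter_append, List.map_append]
    congr 1
    by_cases h : x ≤ y
    · simp [h]
    · simp [h]
  by_cases hx : x = 0
  · subst hx
    unfold fenAdd
    rw [if_pos rfl]
    constructor
    · rw [Array.size_setIfInBounds]; exact hsz
    · intro y hy0 hy1
      rw [fenRank_eq _ y hy0, hfilter y, List.sum_append, if_pos hy0]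
      have h0 : rd (arr.setIfInBounds 0 (arr.getD 0 0 + val)) 0 = rd arr 0 + val := by
        rw [rd_set arr 0 _ (by omega) 0, if_pos rfl]; rfl
      have hmap : (dpathM y.toNat).map (rd (arr.setIfInBounds 0 (arr.getD 0 0 + val)))
          = (dpathM y.toNat).map (rd arr) := by
        apply List.map_congr_left
        intro i hi
        have := mem_dpathM_pos y.toNat i hi
        rw [rd_set arr 0 _ (by omega) i, if_neg (by omega)]
      have hg := hrank y hy0 hy1
      rw [fenRank_eq _ y hy0] at hg
      rw [h0, hmap]
      simp only [List.sum_cons, List.sum_nil]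
      linarith [hg]
  · have hx1 : (1:ℤ) ≤ x := by omega
    unfold fenAdd
    rw [if_neg hx]
    have hsz' : (fenAddLoop (10^6+1) arr x val ((10^6+1:Int)).toNat).size = arr.size :=
      size_fenAddLoop _ _ arr x val
    have hrd : ∀ i, rd (fenAddLoop (10^6+1) arr x val ((10^6+1:Int)).toNat) i
        = rd arr i + (if i ∈ upathM 1000001 x.toNat then val else 0) := by
      intro i
      exact fenAddLoop_rd _ x arr val hx1 hsz (by omega) i
    constructor
    · rw [hsz']; exact hsz
    · intro y hy0 hy1
      rw [fenRank_eq _ y hy0, hfilter y, List.sum_append]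
      have h0 : rd (fenAddLoop (10^6+1) arr x val ((10^6+1:Int)).toNat) 0 = rd arr 0 := by
        rw [hrd 0, if_neg (by
          intro hmem
          have := mem_upathM_ge 1000001 1000001 x.toNat 0 (by omega) hmem
          omega)]
        ring
      have hmap : (dpathM y.toNat).map (rd (fenAddLoop (10^6+1) arr x val ((10^6+1:Int)).toNat))
          = (dpathM y.toNat).map (fun i => rd arr i
              + (if i ∈ upathM 1000001 x.toNat then val else 0)) :=
        List.map_congr_left (fun i _ => hrd i)
      rw [h0, hmap, PySem.List.sum_map_add_int]
      have hite : ((dpathM y.toNat).map (fun i => if i ∈ upathM 1000001 x.toNat then val else 0)).sum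
          = val * ((dpathM y.toNat).countP (fun i => decide (i ∈ upathM 1000001 x.toNat)) : Int) := by
        rw [List.map_congr_left (fun (i : ℕ) _ => show (if i ∈ upathM 1000001 x.toNat then val else 0)
            = val * (if (fun i => decide (i ∈ upathM 1000001 x.toNat)) i = true then (1:ℤ) else 0) by
          by_cases h : i ∈ upathM 1000001 x.toNat <;> simp [h])]
        rw [List.sum_map_mul_left, PySem.List.sum_map_ite_one_zero]
      rw [hite, cnt_lemma y.toNat x.toNat 1000001 (by omega) (by omega)]
      have hgoal := hrank y hy0 hy1
      rw [fenRank_eq _ y hy0] at hgoal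
      have hg := hrank y hy0 hy1
      rw [fenRank_eq _ y hy0] at hg
      by_cases hxy : x ≤ y
      · rw [if_pos (show x.toNat ≤ y.toNat by omega), if_pos hxy]
        simp only [List.sum_cons, List.sum_nil, Nat.cast_one, mul_one]
        linarith [hg]
      · rw [if_neg (show ¬ x.toNat ≤ y.toNat by omega), if_neg hxy]
        simp only [List.sum_nil, Nat.cast_zero, mul_zero]
        linarith [hg]

-- ## 7. B-side: weighted sums of sorted lists
def W (k : Int) (l : List Int) : Int :=
  ((PySem.List.enumerate l k).map (fun p => (p.1 + 1) * p.2)).sum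

theorem W_cons (k : Int) (x : Int) (t : List Int) : W k (x :: t) = (k+1)*x + W (k+1) t := by
  unfold W
  rw [PySem.List.enumerate_cons, List.map_cons, List.sum_cons]

theorem W_shift : ∀ (l : List Int) (k : Int), W (k+1) l = W k l + l.sum := by
  intro l
  induction l with
  | nil => intro k; simp [W]
  | cons x t ih =>
    intro k
    rw [W_cons, W_cons, List.sum_cons, ih (k+1)]
    ring

theorem W_insert : ∀ (s : List Int), s.Pairwise (· ≤ ·) → ∀ (v k : Int),
    W k (PySem.List.insertBy (fun a b => decide (a < b)) v s)
      = W k s + ((s.countP (fun u => decide (u ≤ v)) : Int) + k + 1) * v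
          + (s.filter (fun u => decide (v < u))).sum := by
  intro s
  induction s with
  | nil =>
    intro _ v k
    show W k [v] = _
    rw [W_cons]
    simp [W]
  | cons h t ih =>
    intro hp v k
    have hpt : t.Pairwise (· ≤ ·) := (List.pairwise_cons.mp hp).2
    have hht : ∀ u ∈ t, h ≤ u := (List.pairwise_cons.mp hp).1
    show W k (if (decide (v < h)) = true then v :: h :: t else h :: PySem.List.insertBy _ v t) = _
    by_cases hvh : v < h
    · rw [if_pos (by simpa using hvh)]
      rw [W_cons, W_cons, W_shift, W_cons]
      have hcnt : t.countP (fun u => decide (u ≤ v)) = 0 := by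
        rw [List.countP_eq_zero]
        intro u hu
        simp only [decide_eq_true_eq]
        have := hht u hu
        omega
      have hflt : (h :: t).filter (fun u => decide (v < u)) = h :: t := by
        rw [List.filter_eq_self]
        intro u hu
        simp only [decide_eq_true_eq]
        rcases List.mem_cons.mp hu with e | hu'
        · omega
        · have := hht u hu'
          omega
      rw [hflt]
      rw [List.countP_cons, hcnt]
      have : ¬ (h ≤ v) := by omega
      simp only [this, decide_false]
      simp only [List.sum_cons]
      push_cast
      ring
    · rw [if_neg (by simpa using hvh)]
      rw [W_cons, W_cons, ih hpt v (k+1)]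
      rw [List.countP_cons, List.filter_cons]
      have hhv : h ≤ v := by omega
      simp only [hhv, decide_true, show ¬ (v < h) from hvh, decide_false]
      simp only [Bool.false_eq_true, if_false]
      push_cast
      ring

theorem sorted_snoc (s : List Int) (hs : s.Pairwise (· ≤ ·)) (v : Int) :
    PySem.List.sorted (s ++ [v]) (fun x => x)
      = PySem.List.insertBy (fun a b => decide (a < b)) v s := by
  rw [PySem.List.sorted_eq_foldl_insertBy, List.foldl_append]
  simp only [List.foldl_cons, List.foldl_nil]
  have : List.foldl (fun acc x => PySem.List.insertBy (fun a b => decide ((fun x => x) a < (fun x => x) b)) x acc) [] s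
      = PySem.List.sorted s (fun x => x) := (PySem.List.sorted_eq_foldl_insertBy s _).symm
  rw [this, PySem.List.sorted_eq_self_of_pairwise s _ hs]

-- ## 8. spec shapes of the two rank results
theorem cnt_spec (l : List Int) (y : Int) :
    ((((l.map (fun v => (v, (1:Int)))).filter (fun p => decide (p.1 ≤ y))).map (fun p => p.2)).sum)
      = (l.countP (fun u => decide (u ≤ y)) : Int) := by
  rw [List.filter_map, List.map_map]
  have : ((fun p : Int × Int => p.2) ∘ (fun v => (v, (1:Int)))) = fun _ => (1:Int) := rfl
  rw [this, PySem.List.sum_map_const_int]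
  have : ((fun p : Int × Int => decide (p.1 ≤ y)) ∘ (fun v => (v, (1:Int)))) = fun u => decide (u ≤ y) := rfl
  rw [this, ← List.countP_eq_length_filter]
  ring

theorem sum_spec (l : List Int) (y : Int) :
    ((((l.map (fun v => (v, v))).filter (fun p => decide (p.1 ≤ y))).map (fun p => p.2)).sum)
      = (l.filter (fun u => decide (u ≤ y))).sum := by
  rw [List.filter_map, List.map_map]
  have : ((fun p : Int × Int => p.2) ∘ (fun v : Int => (v, v))) = id := rfl
  rw [this, List.map_id]
  rfl

theorem sum_filter_split (l : List Int) (v : Int) :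
    l.sum = (l.filter (fun u => decide (u ≤ v))).sum + (l.filter (fun u => decide (v < u))).sum := by
  induction l with
  | nil => rfl
  | cons x t ih =>
    rw [List.sum_cons, List.filter_cons, List.filter_cons]
    by_cases h : x ≤ v
    · simp only [h, decide_true, show ¬ (v < x) by omega, decide_false, if_true,
        Bool.false_eq_true, if_false]
      rw [List.sum_cons, ih]
      ring
    · simp only [h, decide_false, show v < x by omega, decide_true, if_true,
        Bool.false_eq_true, if_false]
      rw [List.sum_cons, ih]
      ring

-- ## 9. the main loop correspondence
theorem main_loop : ∀ (rest pfx : List Int) (pre post : Array Int) (ans : Int),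
    (∀ v ∈ rest, 0 ≤ v ∧ v ≤ 10^6) →
    FenInv pre (pfx.map (fun v => (v, 1))) →
    FenInv post (pfx.map (fun v => (v, v))) →
    (rest.foldl (sortedSumStep (10^6+1))
        (pre, post, PySem.Int.mod (W 0 (PySem.List.sorted pfx (fun x => x))) (10^9+7),
          pfx.sum, ans)).2.2.2.2
    = (rest.foldl
        (fun (st : List Int × Int) v =>
          let s := PySem.List.sorted (st.1 ++ [v]) (fun x => x)
          let temp := PySem.Int.mod
            (((PySem.List.enumerate s).map (fun p => (p.1 + 1) * p.2)).sum) (10 ^ 9 + 7)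
          (s, PySem.Int.mod (st.2 + temp) (10 ^ 9 + 7)))
        (PySem.List.sorted pfx (fun x => x), ans)).2 := by
  intro rest
  induction rest with
  | nil => intros; rfl
  | cons v rest ih =>
    intro pfx pre post ans hrest hinv1 hinv2
    have hv := hrest v List.mem_cons_self
    have hKpos : (0:ℤ) < 10^9+7 := by norm_num
    have hM : ((10:ℤ)^9+7) = 1000000007 := by norm_num
    have hs : (PySem.List.sorted pfx (fun x => x)).Pairwise (· ≤ ·) := by
      have := PySem.List.sorted_pairwise pfx (fun x => x)
      simpa using this
    have hperm : (PySem.List.sorted pfx (fun x => x)).Perm pfx :=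
      PySem.List.sorted_perm pfx _ _
    have hrank1 : fenRank pre v = (pfx.countP (fun u => decide (u ≤ v)) : Int) := by
      rw [hinv1.2 v hv.1 hv.2, cnt_spec]
    have hrank2 : fenRank post v = (pfx.filter (fun u => decide (u ≤ v))).sum := by
      rw [hinv2.2 v hv.1 hv.2, sum_spec]
    have hsorted_new : PySem.List.sorted (PySem.List.sorted pfx (fun x => x) ++ [v]) (fun x => x)
        = PySem.List.sorted (pfx ++ [v]) (fun x => x) :=
      PySem.List.sorted_eq_sorted_of_perm _ _ _ (fun _ _ h => h) (hperm.append_right [v])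
    have hWnew : W 0 (PySem.List.sorted (pfx ++ [v]) (fun x => x))
        = W 0 (PySem.List.sorted pfx (fun x => x))
          + ((pfx.countP (fun u => decide (u ≤ v)) : Int) + 1) * v
          + (pfx.filter (fun u => decide (v < u))).sum := by
      rw [← hsorted_new, sorted_snoc _ hs v, W_insert _ hs v 0]
      rw [hperm.countP_eq, (hperm.filter _).sum_eq]
      ring
    have htemp : PySem.Int.mod
        (PySem.Int.mod (W 0 (PySem.List.sorted pfx (fun x => x))) (10^9+7)
          + (fenRank pre v + 1) * v + (pfx.sum - fenRank post v)) (10^9+7)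
        = PySem.Int.mod (W 0 (PySem.List.sorted (pfx ++ [v]) (fun x => x))) (10^9+7) := by
      rw [hrank1, hrank2]
      simp only [PySem.Int.mod_eq_emod_of_pos hKpos]
      rw [hWnew, sum_filter_split pfx v, hM]
      have hre : ∀ A B : ℤ, (A % 1000000007 + B) % 1000000007 = (A + B) % 1000000007 :=
        fun A B => by omega
      rw [show W 0 (PySem.List.sorted pfx (fun x => x)) % 1000000007
            + ((pfx.countP (fun u => decide (u ≤ v)) : Int) + 1) * v
            + ((pfx.filter (fun u => decide (u ≤ v))).sum
                + (pfx.filter (fun u => decide (v < u))).sum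
              - (pfx.filter (fun u => decide (u ≤ v))).sum)
          = W 0 (PySem.List.sorted pfx (fun x => x)) % 1000000007
            + (((pfx.countP (fun u => decide (u ≤ v)) : Int) + 1) * v
               + (pfx.filter (fun u => decide (v < u))).sum) by ring]
      rw [hre]
      congr 1
      ring
    have hstep : sortedSumStep (10^6+1)
        (pre, post, PySem.Int.mod (W 0 (PySem.List.sorted pfx (fun x => x))) (10^9+7),
          pfx.sum, ans) v
        = (fenAdd (10^6+1) pre v 1, fenAdd (10^6+1) post v v,
           PySem.Int.mod (W 0 (PySem.List.sorted (pfx ++ [v]) (fun x => x))) (10^9+7),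
           (pfx ++ [v]).sum,
           PySem.Int.mod (ans + PySem.Int.mod
             (W 0 (PySem.List.sorted (pfx ++ [v]) (fun x => x))) (10^9+7)) (10^9+7)) := by
      unfold sortedSumStep
      rw [Prod.mk.injEq, Prod.mk.injEq, Prod.mk.injEq, Prod.mk.injEq]
      refine ⟨rfl, rfl, htemp, ?_, ?_⟩
      · rw [List.sum_append, List.sum_cons, List.sum_nil, add_zero]
      · rw [htemp]
    simp only [List.foldl_cons]
    rw [hstep, hsorted_new]
    have hinv1' : FenInv (fenAdd (10^6+1) pre v 1) ((pfx ++ [v]).map (fun v => (v, 1))) := by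
      rw [List.map_append]
      exact FenInv_step pre _ v 1 hinv1 hv.1 hv.2
    have hinv2' : FenInv (fenAdd (10^6+1) post v v) ((pfx ++ [v]).map (fun v => (v, v))) := by
      rw [List.map_append]
      exact FenInv_step post _ v v hinv2 hv.1 hv.2
    exact ih (pfx ++ [v]) _ _ _ (fun u hu => hrest u (List.mem_cons_of_mem _ hu)) hinv1' hinv2'


-- ===== VERDICT (by name: the statement is the Claim_ definition above) =====
theorem sortedSum_spec : Claim_equal_sortedSum := by
  intro a hdom hpre
  unfold Spec_sortedSum sortedSum sortedSum_alt
  dsimp only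
  rw [PySem.List.foldl_pyRange_pyGetD' a 0 (sortedSumStep (10^6+1)) _ (le_refl 0)]
  simp only [Int.toNat_zero, List.drop_zero]
  exact main_loop a [] _ _ 0 (fun v hv => hpre v hv) FenInv_nil FenInv_nil
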